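-- pv_equiv track=rewrite | github.com/hanab728/unfollow-planner | src/unfollow_planner.py | build_unfollow_list
-- ===== SOURCE A (Python) =====
-- def build_unfollow_list(given, following=None):
--     """Return (to_unfollow, not_found) lists.
--
--     Parameters
--     ----------
--     given : list[str]
--         Usernames the user wants to unfollow (may contain duplicates).
--     following : list[str] or None
--         Usernames the user currently follows. When None, every entry in
--         *given* goes straight into *to_unfollow*.
--
--     Returns
--     -------
--     to_unfollow : list[str]
--         Deduplicated, ordered list of usernames to unfollow.
--     not_found : list[str]
--         Usernames that were in *given* but not found in *following*.
--         Always empty when *following* is None.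
--     """
--     # Deduplicate while preserving order
--     seen = set()
--     unique_given = []
--     for name in given:
--         if name not in seen:
--             seen.add(name)
--             unique_given.append(name)
--
--     if following is None:
--         return unique_given, []
--
--     following_set = set(following)
--     to_unfollow = []
--     not_found = []
--     for name in unique_given:
--         if name in following_set:
--             to_unfollow.append(name)
--         else:
--             not_found.append(name)
--
--     return to_unfollow, not_found
-- ===== SOURCE B (Python) =====
-- def build_unfollow_list(given, following=None):
--     """Single fused pass: dedupe and route each first-seen name at once."""
--     following_set = None if following is None else set(following)
--     seen = set()
--     to_unfollow = []
--     not_found = []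
--     for name in given:
--         if name in seen:
--             continue
--         seen.add(name)
--         if following_set is None or name in following_set:
--             to_unfollow.append(name)
--         else:
--             not_found.append(name)
--     return to_unfollow, not_found
-- ===== Notes on version B (the rewrite author's own statement) =====
-- stated objective: simpler
-- what changed: A's two sequential passes (dedupe into unique_given, then split against following_set) are fused into one pass over given that routes each first-seen name directly, dropping the intermediate unique_given list.
import Mathlib
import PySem

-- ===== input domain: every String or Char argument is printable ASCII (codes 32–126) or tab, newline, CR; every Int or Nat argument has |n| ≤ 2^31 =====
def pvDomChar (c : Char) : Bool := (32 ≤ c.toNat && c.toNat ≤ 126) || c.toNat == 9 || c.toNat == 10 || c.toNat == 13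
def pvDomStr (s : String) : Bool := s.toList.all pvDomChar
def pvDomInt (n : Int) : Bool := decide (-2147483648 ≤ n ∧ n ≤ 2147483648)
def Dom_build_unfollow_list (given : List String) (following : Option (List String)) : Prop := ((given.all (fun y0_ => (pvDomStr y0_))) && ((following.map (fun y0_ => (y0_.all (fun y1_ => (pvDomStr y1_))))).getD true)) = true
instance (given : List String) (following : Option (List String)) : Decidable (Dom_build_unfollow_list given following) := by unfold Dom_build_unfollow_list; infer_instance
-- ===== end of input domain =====

-- B fuses A's two passes (dedupe, then split against following) into one pass that
-- routes each first-seen name directly; objective: simpler (same asymptotic cost).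

-- ===== PORT A =====
-- the dedupe loop body: 'if name not in seen: seen.add(name); unique_given.append(name)'
def pvStepDedup (st : PySem.Set String × List String) (name : String) :
    PySem.Set String × List String :=
  if PySem.Set.contains st.1 name then st else (PySem.Set.add st.1 name, st.2 ++ [name])

-- the second loop body: route name by membership in following_set
def pvStepSplit (fs : PySem.Set String) (acc : List String × List String) (name : String) :
    List String × List String :=
  if PySem.Set.contains fs name then (acc.1 ++ [name], acc.2) else (acc.1, acc.2 ++ [name])

def build_unfollow_list (given : List String) (following : Option (List String)) :
    List String × List String :=
  let st := given.foldl pvStepDedup (PySem.Set.empty, [])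
  match following with
  | none => (st.2, [])
  | some f =>
    let fs : PySem.Set String := PySem.Set.ofList f
    st.2.foldl (pvStepSplit fs) ([], [])

-- ===== PORT B =====
-- the fused loop body: skip seen names, otherwise route immediately
def pvStepFused (fs : Option (PySem.Set String))
    (st : PySem.Set String × List String × List String) (name : String) :
    PySem.Set String × List String × List String :=
  if PySem.Set.contains st.1 name then st
  else
    let seen := PySem.Set.add st.1 name
    if (match fs with | none => true | some s => PySem.Set.contains s name) then
      (seen, st.2.1 ++ [name], st.2.2)
    else
      (seen, st.2.1, st.2.2 ++ [name])

def build_unfollow_list_alt (given : List String) (following : Option (List String)) :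
    List String × List String :=
  let fs := following.map (fun f => PySem.Set.ofList f)
  let st := given.foldl (pvStepFused fs) (PySem.Set.empty, [], [])
  (st.2.1, st.2.2)

-- ===== PRECONDITION & SPEC =====
def Spec_build_unfollow_list (given : List String) (following : Option (List String)) (out : List String × List String) : Prop := out = build_unfollow_list_alt given following
instance (given : List String) (following : Option (List String)) (out : List String × List String) : Decidable (Spec_build_unfollow_list given following out) := by unfold Spec_build_unfollow_list; infer_instance

-- ===== CLAIM (what is proved, stated in full; the proofs are below) =====
def Claim_equal_build_unfollow_list : Prop := ∀ (given : List String) (following : Option (List String)), Dom_build_unfollow_list given following → Spec_build_unfollow_list given following (build_unfollow_list given following)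

-- ===== LEMMAS AND PROOFS =====

-- the dedupe fold's list accumulator only appends
theorem pvDedup_acc (l : List String) : ∀ (seen : PySem.Set String) (u : List String),
    l.foldl pvStepDedup (seen, u) =
      ((l.foldl pvStepDedup (seen, [])).1, u ++ (l.foldl pvStepDedup (seen, [])).2) := by
  induction l with
  | nil => intro seen u; simp
  | cons x l ih =>
    intro seen u
    by_cases hx : x ∈ seen
    · have h1 : ∀ v : List String, pvStepDedup (seen, v) x = (seen, v) := by
        intro v; simp [pvStepDedup, hx]
      rw [List.foldl_cons, List.foldl_cons, h1, h1]
      exact ih seen u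
    · have h1 : ∀ v : List String, pvStepDedup (seen, v) x = (PySem.Set.add seen x, v ++ [x]) := by
        intro v; simp [pvStepDedup, hx]
      rw [List.foldl_cons, List.foldl_cons, h1, h1,
        ih (PySem.Set.add seen x) (u ++ [x]), ih (PySem.Set.add seen x) ([] ++ [x])]
      simp

-- the fused fold with fs = none is the dedupe fold (not_found untouched)
theorem pvFused_none (l : List String) : ∀ (seen : PySem.Set String) (tu nf : List String),
    l.foldl (pvStepFused none) (seen, tu, nf) =
      ((l.foldl pvStepDedup (seen, tu)).1, (l.foldl pvStepDedup (seen, tu)).2, nf) := by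
  induction l with
  | nil => intro seen tu nf; simp
  | cons x l ih =>
    intro seen tu nf
    by_cases hx : x ∈ seen
    · have h1 : pvStepFused none (seen, tu, nf) x = (seen, tu, nf) := by
        simp [pvStepFused, hx]
      have h2 : pvStepDedup (seen, tu) x = (seen, tu) := by
        simp [pvStepDedup, hx]
      rw [List.foldl_cons, List.foldl_cons, h1, h2]
      exact ih seen tu nf
    · have h1 : pvStepFused none (seen, tu, nf) x = (PySem.Set.add seen x, tu ++ [x], nf) := by
        simp [pvStepFused, hx]
      have h2 : pvStepDedup (seen, tu) x = (PySem.Set.add seen x, tu ++ [x]) := by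
        simp [pvStepDedup, hx]
      rw [List.foldl_cons, List.foldl_cons, h1, h2]
      exact ih (PySem.Set.add seen x) (tu ++ [x]) nf

-- the fused fold with fs = some is the dedupe fold followed by the split fold
theorem pvFused_some (fs : PySem.Set String) (l : List String) :
    ∀ (seen : PySem.Set String) (tu nf : List String),
    l.foldl (pvStepFused (some fs)) (seen, tu, nf) =
      ((l.foldl pvStepDedup (seen, [])).1,
       (l.foldl pvStepDedup (seen, [])).2.foldl (pvStepSplit fs) (tu, nf)) := by
  induction l with
  | nil => intro seen tu nf; simp
  | cons x l ih =>
    intro seen tu nf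
    by_cases hx : x ∈ seen
    · have hd : pvStepDedup (seen, ([] : List String)) x = (seen, []) := by
        simp [pvStepDedup, hx]
      have hf : pvStepFused (some fs) (seen, tu, nf) x = (seen, tu, nf) := by
        simp [pvStepFused, hx]
      rw [List.foldl_cons, List.foldl_cons, hd, hf]
      exact ih seen tu nf
    · have hd : pvStepDedup (seen, ([] : List String)) x = (PySem.Set.add seen x, [] ++ [x]) := by
        simp [pvStepDedup, hx]
      rw [List.foldl_cons, List.foldl_cons, hd,
        pvDedup_acc l (PySem.Set.add seen x) ([] ++ [x])]
      by_cases hm : x ∈ fs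
      · have hf : pvStepFused (some fs) (seen, tu, nf) x =
            (PySem.Set.add seen x, tu ++ [x], nf) := by
          simp [pvStepFused, hx, hm]
        have hs : pvStepSplit fs (tu, nf) x = (tu ++ [x], nf) := by
          simp [pvStepSplit, hm]
        rw [hf, ih (PySem.Set.add seen x) (tu ++ [x]) nf]
        simp [hs]
      · have hf : pvStepFused (some fs) (seen, tu, nf) x =
            (PySem.Set.add seen x, tu, nf ++ [x]) := by
          simp [pvStepFused, hx, hm]
        have hs : pvStepSplit fs (tu, nf) x = (tu, nf ++ [x]) := by
          simp [pvStepSplit, hm]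
        rw [hf, ih (PySem.Set.add seen x) tu (nf ++ [x])]
        simp [hs]

-- ===== VERDICT (by name: the statement is the Claim_ definition above) =====
theorem build_unfollow_list_spec : Claim_equal_build_unfollow_list := by
  intro given following _
  unfold Spec_build_unfollow_list build_unfollow_list build_unfollow_list_alt
  cases following with
  | none =>
    show ((given.foldl pvStepDedup (PySem.Set.empty, [])).2, ([] : List String)) =
      ((given.foldl (pvStepFused none) (PySem.Set.empty, [], [])).2.1,
       (given.foldl (pvStepFused none) (PySem.Set.empty, [], [])).2.2)
    rw [pvFused_none given PySem.Set.empty [] []]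
  | some f =>
    show (given.foldl pvStepDedup (PySem.Set.empty, [])).2.foldl
        (pvStepSplit (PySem.Set.ofList f)) ([], []) =
      ((given.foldl (pvStepFused (some (PySem.Set.ofList f))) (PySem.Set.empty, [], [])).2.1,
       (given.foldl (pvStepFused (some (PySem.Set.ofList f))) (PySem.Set.empty, [], [])).2.2)
    rw [pvFused_some (PySem.Set.ofList f) given PySem.Set.empty [] []]
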